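-- pv_equiv track=rewrite | github.com/Sugayoiya/excel-to-json | real_excel_to_json.py | construct_header
-- ===== SOURCE A (Python) =====
-- def equal_left(l, index):
--     for i in l[index::-1]:
--         if i != '':
--             return i
--
-- def construct_header(header_list: list) -> list:
--     new_headers = []
--     for i in range(len(header_list)):
--         new_header_list = []
--         for j in range(len(header_list[0])):
--             if i == 0:
--                 new_header_list.append(equal_left(header_list[i], j))
--             elif header_list[i][j] == '':
--                 new_header_list.append(header_list[i - 1][j]) if header_list[i - 1][j] != '' \
--                     else new_header_list.append(equal_left(header_list[i], j))
--             else: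
--                 new_header_list.append(header_list[i][j])
--         new_headers.append(new_header_list)
--     return new_headers
-- ===== SOURCE B (Python) =====
-- def construct_header(header_list: list) -> list:
--     if not header_list:
--         return []
--     width = len(header_list[0])
--     # Pass 1: left-fill table. L[i][k] = last non-empty cell in row i at or
--     # before column k (None if none), computed with a single carry per row.
--     L = []
--     for row in header_list:
--         carry = None
--         fills = []
--         for k in range(width):
--             if row[k] != '':
--                 carry = row[k]
--             fills.append(carry)
--         L.append(fills)
--     # Pass 2: combine. Row 0 is its own left-fill; later rows prefer their own
--     # cell, then the ORIGINAL cell above, then their left-fill.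
--     result = [L[0][:]]
--     for i in range(1, len(header_list)):
--         row, prev, fills = header_list[i], header_list[i - 1], L[i]
--         out_row = []
--         for j in range(width):
--             if row[j] != '':
--                 out_row.append(row[j])
--             elif prev[j] != '':
--                 out_row.append(prev[j])
--             else:
--                 out_row.append(fills[j])
--         result.append(out_row)
--     return result
-- ===== Notes on version B (the rewrite author's own statement) =====
-- stated objective: alternative
-- what changed: Replaces A's per-cell backward rescan (equal_left slices and scans the row prefix for every column) with a precomputed left-fill table built in one carry-forward pass per row, then a second pass combining own cell / original cell above / table entry; avoids rescanning but trades it for an extra table.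
import Mathlib
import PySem

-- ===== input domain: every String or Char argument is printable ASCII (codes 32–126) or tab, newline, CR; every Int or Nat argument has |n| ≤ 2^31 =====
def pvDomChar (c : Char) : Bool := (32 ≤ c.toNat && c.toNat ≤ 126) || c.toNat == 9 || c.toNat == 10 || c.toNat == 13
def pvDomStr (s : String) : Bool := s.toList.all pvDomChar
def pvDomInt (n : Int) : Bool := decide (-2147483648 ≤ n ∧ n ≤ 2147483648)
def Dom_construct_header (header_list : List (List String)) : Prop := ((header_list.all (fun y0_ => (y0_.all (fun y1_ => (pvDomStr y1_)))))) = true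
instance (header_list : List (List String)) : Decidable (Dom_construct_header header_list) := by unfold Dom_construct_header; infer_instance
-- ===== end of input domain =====

-- B replaces A's per-cell backward rescan with a precomputed carry-forward left-fill table per row (table-first, then combine); return value only.

-- ===== PORT A =====
-- equal_left: scan l[index::-1] (reverse of the prefix up to index) for the first non-empty cell
def equal_left_loop : List String → Option String
  | [] => none
  | i :: rest => if i ≠ "" then some i else equal_left_loop rest

def equal_left (l : List String) (index : Nat) : Option String :=
  equal_left_loop (l.take (index + 1)).reverse

def construct_header (header_list : List (List String)) : List (List (Option String)) :=
  let n := header_list.length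
  let w := (header_list.headD []).length
  (List.range n).map (fun i =>
    (List.range w).map (fun j =>
      if i = 0 then equal_left (header_list.getD i []) j
      else if (header_list.getD i []).getD j "" = "" then
        (if (header_list.getD (i - 1) []).getD j "" ≠ "" then
          some ((header_list.getD (i - 1) []).getD j "")
         else equal_left (header_list.getD i []) j)
      else some ((header_list.getD i []).getD j "")))

-- ===== PORT B =====
-- carry-forward left-fill of a row
def carryFill (cells : List String) (carry : Option String) : List (Option String) :=
  match cells with
  | [] => []
  | c :: rest =>
    let carry' := if c ≠ "" then some c else carry
    carry' :: carryFill rest carry'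

def construct_header_alt (header_list : List (List String)) : List (List (Option String)) :=
  match header_list with
  | [] => []
  | first :: rest =>
    let w := first.length
    let L := (first :: rest).map (fun row => carryFill (row.take w) none)
    (L.headD []) ::
      (List.range rest.length).map (fun i' =>
        let i := i' + 1
        let row := (first :: rest).getD i []
        let prev := (first :: rest).getD (i - 1) []
        let fills := L.getD i []
        (List.range w).map (fun j =>
          if row.getD j "" ≠ "" then some (row.getD j "")
          else if prev.getD j "" ≠ "" then some (prev.getD j "")
          else fills.getD j none))

-- ===== PRECONDITION & SPEC =====
-- Pre_ excludes ragged inputs where some row after the first is shorter than row 0: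
-- there Python A raises IndexError (and Python B does too).
def Pre_construct_header (header_list : List (List String)) : Prop :=
  ∀ row ∈ header_list.tail, (header_list.headD []).length ≤ row.length
instance (header_list : List (List String)) : Decidable (Pre_construct_header header_list) := by unfold Pre_construct_header; infer_instance

def pvWitness_construct_header : List (List String) :=
  [["a", "", "b"], ["", "x", ""], ["", "", "y"]]

def Spec_construct_header (header_list : List (List String)) (out : List (List (Option String))) : Prop := out = construct_header_alt header_list
instance (header_list : List (List String)) (out : List (List (Option String))) : Decidable (Spec_construct_header header_list out) := by unfold Spec_construct_header; infer_instance

-- ===== CLAIM (what is proved, stated in full; the proofs are below) =====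
def Claim_equal_construct_header : Prop := ∀ (header_list : List (List String)), Dom_construct_header header_list → Pre_construct_header header_list → Spec_construct_header header_list (construct_header header_list)

-- ===== LEMMAS AND PROOFS =====

theorem equal_left_loop_append (xs : List String) (a : String) :
    equal_left_loop (xs ++ [a]) =
      match equal_left_loop xs with
      | some s => some s
      | none => if a ≠ "" then some a else none := by
  induction xs with
  | nil => simp [equal_left_loop]
  | cons x xs ih =>
    by_cases hx : x = "" <;> simp [equal_left_loop, hx, ih]

theorem carryFill_getD (l : List String) (c : Option String) (j : Nat) (hj : j < l.length) :
    (carryFill l c).getD j none =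
      match equal_left_loop (l.take (j + 1)).reverse with
      | some s => some s
      | none => c := by
  induction l generalizing c j with
  | nil => simp at hj
  | cons a l ih =>
    cases j with
    | zero =>
      by_cases ha : a = "" <;> simp [carryFill, equal_left_loop, ha]
    | succ j =>
      have hj' : j < l.length := by simpa using hj
      simp only [carryFill, List.getD_cons_succ, List.take_succ_cons, List.reverse_cons]
      rw [ih _ _ hj', equal_left_loop_append]
      by_cases ha : a = "" <;>
        cases h : equal_left_loop (l.take (j + 1)).reverse <;> simp [ha]

-- the table entry equals equal_left, for rows at least w long
theorem carryFill_eq_equal_left (row : List String) (w j : Nat) (hj : j < w)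
    (hw : w ≤ row.length) :
    (carryFill (row.take w) none).getD j none = equal_left row j := by
  have hlen : j < (row.take w).length := by simp [List.length_take]; omega
  rw [carryFill_getD _ _ _ hlen, List.take_take]
  have : min (j + 1) w = j + 1 := by omega
  rw [this]
  cases h : equal_left_loop (row.take (j + 1)).reverse <;> simp [equal_left, h]

theorem carryFill_length (l : List String) (c : Option String) :
    (carryFill l c).length = l.length := by
  induction l generalizing c with
  | nil => rfl
  | cons a l ih => simp [carryFill, ih]

theorem construct_header_spec : Claim_equal_construct_header := by
  intro header_list _ hpre
  unfold Spec_construct_header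
  cases header_list with
  | nil => rfl
  | cons first rest =>
    unfold construct_header construct_header_alt
    simp only [List.length_cons, List.headD_cons]
    rw [List.range_succ_eq_map]
    simp only [List.map_cons, List.map_map]
    congr 1
    · -- row 0
      apply List.ext_getElem
      · simp [carryFill_length]
      · intro j h1 h2
        have hj : j < first.length := by simpa using h1
        have hj2 : j < (carryFill (first.take first.length) none).length := h2
        simp only [List.getElem_map, List.getElem_range, List.getD_cons_zero, if_true]
        rw [← List.getD_eq_getElem _ none h2]
        exact (carryFill_eq_equal_left first first.length j hj le_rfl).symm
    · -- remaining rows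
      apply List.map_congr_left
      intro i' hi'
      rw [List.mem_range] at hi'
      apply List.map_congr_left
      intro j hj
      rw [List.mem_range] at hj
      simp only [Nat.succ_eq_add_one]
      have hne : ¬ ((i' + 1 : Nat) = 0) := by omega
      simp only [hne, if_false, Nat.add_sub_cancel]
      have hlt : i' + 1 < (first :: rest).length := by simp; omega
      set row := (first :: rest).getD (i' + 1) [] with hrow
      set prev := (first :: rest).getD i' [] with hprev
      have hrmem : row ∈ rest := by
        rw [hrow, List.getD_eq_getElem _ _ hlt, List.getElem_cons_succ]
        exact List.getElem_mem _
      have hwr : first.length ≤ row.length := hpre row (by simpa using hrmem)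
      by_cases hc : row.getD j "" = ""
      · by_cases hp : prev.getD j "" = ""
        · simp only [hc, hp, ne_eq, not_true_eq_false, if_false]
          have hfill : ((first :: rest).map (fun r => carryFill (r.take first.length) none)).getD (i' + 1) []
              = carryFill (row.take first.length) none := by
            rw [List.getD_eq_getElem _ _ (by simpa using hlt), List.getElem_map,
              hrow, List.getD_eq_getElem _ _ hlt]
          simp only [List.map_cons] at hfill ⊢
          rw [hfill]
          exact (carryFill_eq_equal_left row first.length j hj hwr).symm
        · simp only [hc, hp, ne_eq, not_false_eq_true, not_true, if_true, if_false]
      · simp only [hc, ne_eq, not_false_eq_true, if_true, if_false]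

-- ===== VERDICT (by name: the statement is the Claim_ definition above) =====
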